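-- pv_equiv track=rewrite | github.com/NisfuSyaban21/tobor | cobaintegrasi.py | count_objects_in_baskets
-- ===== SOURCE A (Python) =====
-- def count_objects_in_baskets(warna_biru, warna_merah, kotak_silo):
--     result_text = []
--     counts = []
--     new_kotak_silo = sorted(kotak_silo, key=lambda x: x[0])
--     for i, bbox in enumerate(new_kotak_silo):
--         x1s, y1s, x2s, y2s = bbox
--         biru_count = sum(1 for x1, y1, x2, y2 in warna_biru if x1 > x1s and x1 < x2s and y2 > y1s and y2 < y2s)
--         merah_count = sum(1 for x1, y1, x2, y2 in warna_merah if x1 > x1s and x1 < x2s and y2 > y1s and y2 < y2s)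
--         counts.append((merah_count, biru_count))
--         result_text.append("Keranjang {} - merah: {}, biru: {}".format(i + 1, merah_count, biru_count))
--     return result_text, counts
-- ===== SOURCE B (Python) =====
-- def count_objects_in_baskets(warna_biru, warna_merah, kotak_silo):
--     # Sort each object list once by its leading x; per basket, binary-search the
--     # open x-window (x1s, x2s) and test only the y-condition inside that window,
--     # instead of scanning every object for every basket.
--     def prep(objs):
--         pts = sorted(((x1, y2) for x1, y1, x2, y2 in objs), key=lambda p: p[0])
--         xs = [p[0] for p in pts]
--         return xs, pts
--
--     def lower(xs, v):  # first index with xs[i] >= v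
--         lo, hi = 0, len(xs)
--         while lo < hi:
--             mid = (lo + hi) // 2
--             if xs[mid] < v:
--                 lo = mid + 1
--             else:
--                 hi = mid
--         return lo
--
--     def upper(xs, v):  # first index with xs[i] > v
--         lo, hi = 0, len(xs)
--         while lo < hi:
--             mid = (lo + hi) // 2
--             if xs[mid] <= v:
--                 lo = mid + 1
--             else:
--                 hi = mid
--         return lo
--
--     def window_count(xs, pts, x1s, y1s, x2s, y2s):
--         n = 0
--         for i in range(upper(xs, x1s), lower(xs, x2s)):
--             if y1s < pts[i][1] < y2s:
--                 n += 1
--         return n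
--
--     bx, bp = prep(warna_biru)
--     mx, mp = prep(warna_merah)
--     result_text = []
--     counts = []
--     for i, (x1s, y1s, x2s, y2s) in enumerate(sorted(kotak_silo, key=lambda b: b[0])):
--         biru_count = window_count(bx, bp, x1s, y1s, x2s, y2s)
--         merah_count = window_count(mx, mp, x1s, y1s, x2s, y2s)
--         counts.append((merah_count, biru_count))
--         result_text.append("Keranjang {} - merah: {}, biru: {}".format(i + 1, merah_count, biru_count))
--     return result_text, counts
-- ===== Notes on version B (the rewrite author's own statement) =====
-- stated objective: faster
-- what changed: B sorts each object list once by its leading x-coordinate, then for every basket binary-searches the open x-window (x1s, x2s) and tests only the y-condition inside that window, instead of A's fresh full scan of both object lists for every basket.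
import Mathlib
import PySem

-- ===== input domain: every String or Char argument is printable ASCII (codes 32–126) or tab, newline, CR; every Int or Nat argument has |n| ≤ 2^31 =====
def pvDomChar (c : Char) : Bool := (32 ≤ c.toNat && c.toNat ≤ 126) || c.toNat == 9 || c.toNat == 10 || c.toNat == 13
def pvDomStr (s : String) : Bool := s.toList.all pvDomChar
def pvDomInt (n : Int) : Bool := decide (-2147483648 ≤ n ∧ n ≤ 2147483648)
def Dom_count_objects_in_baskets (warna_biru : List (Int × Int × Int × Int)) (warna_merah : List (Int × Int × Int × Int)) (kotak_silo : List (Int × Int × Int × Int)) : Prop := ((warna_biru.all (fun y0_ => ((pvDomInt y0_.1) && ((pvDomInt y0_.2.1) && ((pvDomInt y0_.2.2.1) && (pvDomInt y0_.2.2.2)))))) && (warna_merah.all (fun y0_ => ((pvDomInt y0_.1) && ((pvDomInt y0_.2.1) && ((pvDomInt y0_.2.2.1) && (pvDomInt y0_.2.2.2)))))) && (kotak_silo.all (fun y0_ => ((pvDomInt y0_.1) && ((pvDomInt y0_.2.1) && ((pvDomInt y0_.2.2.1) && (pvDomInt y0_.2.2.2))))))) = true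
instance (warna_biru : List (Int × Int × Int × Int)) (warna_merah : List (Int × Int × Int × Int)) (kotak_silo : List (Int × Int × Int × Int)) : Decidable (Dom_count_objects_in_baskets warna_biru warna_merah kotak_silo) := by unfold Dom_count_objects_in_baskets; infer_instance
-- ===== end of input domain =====

-- B replaces A's per-basket full scan of both object lists by: sort each object list once by
-- its leading x, then per basket binary-search the open x-window and test only the y-condition
-- inside that window; same return value.

-- "Keranjang {} - merah: {}, biru: {}".format(k, m, b)
def pvFmt (k m b : Int) : String :=
  "Keranjang " ++ PySem.Int.toStr k ++ " - merah: " ++ PySem.Int.toStr m ++ ", biru: " ++ PySem.Int.toStr b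

-- ===== PORT A =====
def count_objects_in_baskets (warna_biru : List (Int × Int × Int × Int)) (warna_merah : List (Int × Int × Int × Int)) (kotak_silo : List (Int × Int × Int × Int)) : List String × (List (Int × Int)) :=
  let new_kotak_silo := PySem.List.sorted kotak_silo (fun x => x.1)
  (PySem.List.enumerate new_kotak_silo 0).foldl
    (fun st p =>
      let x1s := p.2.1; let y1s := p.2.2.1; let x2s := p.2.2.2.1; let y2s := p.2.2.2.2
      let biru_count := warna_biru.foldl
        (fun acc q => if q.1 > x1s ∧ q.1 < x2s ∧ q.2.2.2 > y1s ∧ q.2.2.2 < y2s then acc + 1 else acc) (0 : Int)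
      let merah_count := warna_merah.foldl
        (fun acc q => if q.1 > x1s ∧ q.1 < x2s ∧ q.2.2.2 > y1s ∧ q.2.2.2 < y2s then acc + 1 else acc) (0 : Int)
      (st.1 ++ [pvFmt (p.1 + 1) merah_count biru_count], st.2 ++ [(merah_count, biru_count)]))
    ([], [])

-- ===== PORT B =====
-- def prep(objs): the (x1, y2) pairs sorted by leading x, plus the list of their x's
def pvPrep (objs : List (Int × Int × Int × Int)) : List Int × List (Int × Int) :=
  let pts := PySem.List.sorted (objs.map (fun q => (q.1, q.2.2.2))) (fun p => p.1)
  (pts.map (fun p => p.1), pts)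

-- def lower(xs, v): the while loop as fuel recursion (fuel = hi - lo bounds the
-- iteration count; it only makes the loop total and never changes the computation)
def pvLowerAux (xs : List Int) (v : Int) : Nat → Int → Int → Int
  | 0, lo, _ => lo
  | fuel + 1, lo, hi =>
    if lo < hi then
      let mid := PySem.Int.floordiv (lo + hi) 2
      if PySem.List.pyGetD xs mid 0 < v then pvLowerAux xs v fuel (mid + 1) hi
      else pvLowerAux xs v fuel lo mid
    else lo

def pvLower (xs : List Int) (v : Int) (lo hi : Int) : Int :=
  pvLowerAux xs v (hi - lo).toNat lo hi

-- def upper(xs, v)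
def pvUpperAux (xs : List Int) (v : Int) : Nat → Int → Int → Int
  | 0, lo, _ => lo
  | fuel + 1, lo, hi =>
    if lo < hi then
      let mid := PySem.Int.floordiv (lo + hi) 2
      if PySem.List.pyGetD xs mid 0 ≤ v then pvUpperAux xs v fuel (mid + 1) hi
      else pvUpperAux xs v fuel lo mid
    else lo

def pvUpper (xs : List Int) (v : Int) (lo hi : Int) : Int :=
  pvUpperAux xs v (hi - lo).toNat lo hi

-- def window_count(xs, pts, x1s, y1s, x2s, y2s)
def pvWindowCount (xs : List Int) (pts : List (Int × Int)) (x1s y1s x2s y2s : Int) : Int :=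
  (PySem.List.pyRange (pvUpper xs x1s 0 xs.length) (pvLower xs x2s 0 xs.length) 1).foldl
    (fun n i =>
      let p := PySem.List.pyGetD pts i (0, 0)
      if y1s < p.2 ∧ p.2 < y2s then n + 1 else n) 0

def count_objects_in_baskets_alt (warna_biru : List (Int × Int × Int × Int)) (warna_merah : List (Int × Int × Int × Int)) (kotak_silo : List (Int × Int × Int × Int)) : List String × (List (Int × Int)) :=
  let bprep := pvPrep warna_biru
  let mprep := pvPrep warna_merah
  (PySem.List.enumerate (PySem.List.sorted kotak_silo (fun b => b.1)) 0).foldl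
    (fun st p =>
      let biru_count := pvWindowCount bprep.1 bprep.2 p.2.1 p.2.2.1 p.2.2.2.1 p.2.2.2.2
      let merah_count := pvWindowCount mprep.1 mprep.2 p.2.1 p.2.2.1 p.2.2.2.1 p.2.2.2.2
      (st.1 ++ [pvFmt (p.1 + 1) merah_count biru_count], st.2 ++ [(merah_count, biru_count)]))
    ([], [])

-- ===== PRECONDITION & SPEC =====
def Spec_count_objects_in_baskets (warna_biru : List (Int × Int × Int × Int)) (warna_merah : List (Int × Int × Int × Int)) (kotak_silo : List (Int × Int × Int × Int)) (out : List String × (List (Int × Int))) : Prop := out = count_objects_in_baskets_alt warna_biru warna_merah kotak_silo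
instance (warna_biru : List (Int × Int × Int × Int)) (warna_merah : List (Int × Int × Int × Int)) (kotak_silo : List (Int × Int × Int × Int)) (out : List String × (List (Int × Int))) : Decidable (Spec_count_objects_in_baskets warna_biru warna_merah kotak_silo out) := by unfold Spec_count_objects_in_baskets; infer_instance

-- ===== CLAIM =====
def Claim_equal_count_objects_in_baskets : Prop := ∀ (warna_biru : List (Int × Int × Int × Int)) (warna_merah : List (Int × Int × Int × Int)) (kotak_silo : List (Int × Int × Int × Int)), Dom_count_objects_in_baskets warna_biru warna_merah kotak_silo → Spec_count_objects_in_baskets warna_biru warna_merah kotak_silo (count_objects_in_baskets warna_biru warna_merah kotak_silo)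

-- ===== LEMMAS AND PROOFS =====

-- invariant of the hand-written binary searches on a nondecreasing list
lemma pvLowerAux_spec (xs : List Int) (hs : xs.Pairwise (· ≤ ·)) (v : Int) (fuel : Nat)
    (lo hi : Int) (h0 : 0 ≤ lo) (hlh : lo ≤ hi) (hh : hi ≤ xs.length)
    (hf : (hi - lo).toNat ≤ fuel) :
    lo ≤ pvLowerAux xs v fuel lo hi ∧ pvLowerAux xs v fuel lo hi ≤ hi ∧
    (∀ j : Nat, (hj : j < xs.length) → lo ≤ (j : Int) → (j : Int) < pvLowerAux xs v fuel lo hi → xs[j] < v) ∧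
    (∀ j : Nat, (hj : j < xs.length) → pvLowerAux xs v fuel lo hi ≤ (j : Int) → (j : Int) < hi → v ≤ xs[j]) := by
  have hmono : ∀ (i j : Nat) (hi' : i < xs.length) (hj' : j < xs.length), i ≤ j → xs[i] ≤ xs[j] := by
    intro i j hi' hj' hij
    rcases Nat.eq_or_lt_of_le hij with rfl | h
    · rfl
    · exact (List.pairwise_iff_getElem.mp hs) i j hi' hj' h
  induction fuel generalizing lo hi with
  | zero =>
      have : lo = hi := by omega
      subst this
      simp only [pvLowerAux]
      refine ⟨le_refl _, le_refl _, ?_, ?_⟩ <;> (intro j hj a b; omega)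
  | succ fuel ih =>
      simp only [pvLowerAux]
      by_cases h : lo < hi
      · rw [if_pos h]
        set mid := PySem.Int.floordiv (lo + hi) 2 with hmiddef
        have hmb := PySem.Int.floordiv_two_mid_bounds (le_of_lt h)
        rw [← hmiddef] at hmb
        have hmid2 : mid < hi := by
          rw [hmiddef]; exact (PySem.Int.floordiv_lt_iff_lt_mul (by omega)).mpr (by omega)
        have hmidlen : mid.toNat < xs.length := by omega
        have hget : PySem.List.pyGetD xs mid 0 = xs[mid.toNat] :=
          PySem.List.pyGetD_eq_getElem xs 0 (by omega) (by omega)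
        by_cases hlt : PySem.List.pyGetD xs mid 0 < v
        · rw [if_pos hlt]
          obtain ⟨i1, i2, i3, i4⟩ := ih (mid + 1) hi (by omega) (by omega) (by omega) (by omega)
          refine ⟨by omega, i2, ?_, i4⟩
          intro j hj hlo hjr
          by_cases hjm : (j : Int) ≤ mid
          · calc xs[j] ≤ xs[mid.toNat] := hmono _ _ hj hmidlen (by omega)
              _ < v := by rw [← hget]; exact hlt
          · exact i3 j hj (by omega) hjr
        · rw [if_neg hlt]
          obtain ⟨i1, i2, i3, i4⟩ := ih lo mid h0 (by omega) (by omega) (by omega)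
          refine ⟨i1, by omega, i3, ?_⟩
          intro j hj hr hjh
          by_cases hjm : (j : Int) < mid
          · exact i4 j hj hr hjm
          · have hv : v ≤ xs[mid.toNat] := by rw [← hget]; omega
            calc v ≤ xs[mid.toNat] := hv
              _ ≤ xs[j] := hmono _ _ hmidlen hj (by omega)
      · rw [if_neg h]
        refine ⟨le_refl _, hlh, ?_, ?_⟩ <;> (intro j hj a b; omega)

lemma pvLower_spec (xs : List Int) (hs : xs.Pairwise (· ≤ ·)) (v : Int) (lo hi : Int)
    (h0 : 0 ≤ lo) (hlh : lo ≤ hi) (hh : hi ≤ xs.length) :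
    lo ≤ pvLower xs v lo hi ∧ pvLower xs v lo hi ≤ hi ∧
    (∀ j : Nat, (hj : j < xs.length) → lo ≤ (j : Int) → (j : Int) < pvLower xs v lo hi → xs[j] < v) ∧
    (∀ j : Nat, (hj : j < xs.length) → pvLower xs v lo hi ≤ (j : Int) → (j : Int) < hi → v ≤ xs[j]) :=
  pvLowerAux_spec xs hs v (hi - lo).toNat lo hi h0 hlh hh (le_refl _)

lemma pvUpperAux_spec (xs : List Int) (hs : xs.Pairwise (· ≤ ·)) (v : Int) (fuel : Nat)
    (lo hi : Int) (h0 : 0 ≤ lo) (hlh : lo ≤ hi) (hh : hi ≤ xs.length)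
    (hf : (hi - lo).toNat ≤ fuel) :
    lo ≤ pvUpperAux xs v fuel lo hi ∧ pvUpperAux xs v fuel lo hi ≤ hi ∧
    (∀ j : Nat, (hj : j < xs.length) → lo ≤ (j : Int) → (j : Int) < pvUpperAux xs v fuel lo hi → xs[j] ≤ v) ∧
    (∀ j : Nat, (hj : j < xs.length) → pvUpperAux xs v fuel lo hi ≤ (j : Int) → (j : Int) < hi → v < xs[j]) := by
  have hmono : ∀ (i j : Nat) (hi' : i < xs.length) (hj' : j < xs.length), i ≤ j → xs[i] ≤ xs[j] := by
    intro i j hi' hj' hij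
    rcases Nat.eq_or_lt_of_le hij with rfl | h
    · rfl
    · exact (List.pairwise_iff_getElem.mp hs) i j hi' hj' h
  induction fuel generalizing lo hi with
  | zero =>
      have : lo = hi := by omega
      subst this
      simp only [pvUpperAux]
      refine ⟨le_refl _, le_refl _, ?_, ?_⟩ <;> (intro j hj a b; omega)
  | succ fuel ih =>
      simp only [pvUpperAux]
      by_cases h : lo < hi
      · rw [if_pos h]
        set mid := PySem.Int.floordiv (lo + hi) 2 with hmiddef
        have hmb := PySem.Int.floordiv_two_mid_bounds (le_of_lt h)
        rw [← hmiddef] at hmb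
        have hmid2 : mid < hi := by
          rw [hmiddef]; exact (PySem.Int.floordiv_lt_iff_lt_mul (by omega)).mpr (by omega)
        have hmidlen : mid.toNat < xs.length := by omega
        have hget : PySem.List.pyGetD xs mid 0 = xs[mid.toNat] :=
          PySem.List.pyGetD_eq_getElem xs 0 (by omega) (by omega)
        by_cases hlt : PySem.List.pyGetD xs mid 0 ≤ v
        · rw [if_pos hlt]
          obtain ⟨i1, i2, i3, i4⟩ := ih (mid + 1) hi (by omega) (by omega) (by omega) (by omega)
          refine ⟨by omega, i2, ?_, i4⟩
          intro j hj hlo hjr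
          by_cases hjm : (j : Int) ≤ mid
          · calc xs[j] ≤ xs[mid.toNat] := hmono _ _ hj hmidlen (by omega)
              _ ≤ v := by rw [← hget]; exact hlt
          · exact i3 j hj (by omega) hjr
        · rw [if_neg hlt]
          obtain ⟨i1, i2, i3, i4⟩ := ih lo mid h0 (by omega) (by omega) (by omega)
          refine ⟨i1, by omega, i3, ?_⟩
          intro j hj hr hjh
          by_cases hjm : (j : Int) < mid
          · exact i4 j hj hr hjm
          · have hv : v < xs[mid.toNat] := by rw [← hget]; omega
            calc v < xs[mid.toNat] := hv
              _ ≤ xs[j] := hmono _ _ hmidlen hj (by omega)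
      · rw [if_neg h]
        refine ⟨le_refl _, hlh, ?_, ?_⟩ <;> (intro j hj a b; omega)

lemma pvUpper_spec (xs : List Int) (hs : xs.Pairwise (· ≤ ·)) (v : Int) (lo hi : Int)
    (h0 : 0 ≤ lo) (hlh : lo ≤ hi) (hh : hi ≤ xs.length) :
    lo ≤ pvUpper xs v lo hi ∧ pvUpper xs v lo hi ≤ hi ∧
    (∀ j : Nat, (hj : j < xs.length) → lo ≤ (j : Int) → (j : Int) < pvUpper xs v lo hi → xs[j] ≤ v) ∧
    (∀ j : Nat, (hj : j < xs.length) → pvUpper xs v lo hi ≤ (j : Int) → (j : Int) < hi → v < xs[j]) :=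
  pvUpperAux_spec xs hs v (hi - lo).toNat lo hi h0 hlh hh (le_refl _)

-- the window loop, unrolled over an in-range index interval, is a countP over the slice
lemma pvFoldlRange (pts : List (Int × Int)) (y1s y2s : Int) (b : Int) (hb : b ≤ pts.length)
    (a : Int) (h0 : 0 ≤ a) (hab : a ≤ b) (n : Int) :
    (PySem.List.pyRange a b 1).foldl
      (fun n i =>
        let p := PySem.List.pyGetD pts i (0, 0)
        if y1s < p.2 ∧ p.2 < y2s then n + 1 else n) n
    = n + (((pts.take b.toNat).drop a.toNat).countP (fun p => decide (y1s < p.2 ∧ p.2 < y2s)) : Int) := by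
  generalize hk : (b - a).toNat = k
  induction k generalizing a n with
  | zero =>
      have hab' : a = b := by omega
      subst hab'
      rw [PySem.List.pyRange_one_eq_nil (le_refl _)]
      have hnil : (pts.take a.toNat).drop a.toNat = [] := by
        apply List.drop_eq_nil_of_le
        simp
      simp [hnil]
  | succ k ih =>
      have hab' : a < b := by omega
      rw [PySem.List.pyRange_one_cons hab']
      have halen : a.toNat < pts.length := by omega
      have hget : PySem.List.pyGetD pts a (0, 0) = pts[a.toNat] :=
        PySem.List.pyGetD_eq_getElem pts (0, 0) h0 (by omega)
      have hlen : a.toNat < (pts.take b.toNat).length := by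
        simp; omega
      have hdrop : (pts.take b.toNat).drop a.toNat
          = pts[a.toNat] :: (pts.take b.toNat).drop (a.toNat + 1) := by
        rw [List.drop_eq_getElem_cons hlen]
        congr 1
        exact List.getElem_take
      rw [List.foldl_cons]
      simp only [hget]
      rw [ih (a + 1) (by omega) (by omega) _ (by omega)]
      rw [hdrop, List.countP_cons]
      have hsucc : (a + 1).toNat = a.toNat + 1 := by omega
      rw [hsucc]
      by_cases hc : y1s < pts[a.toNat].2 ∧ pts[a.toNat].2 < y2s
      · simp [hc]; ring
      · simp [hc]

-- the window loop counts the full containment condition over the whole sorted point list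
lemma pvWindowCount_eq (pts : List (Int × Int)) (hs : pts.Pairwise (fun a b => a.1 ≤ b.1))
    (x1s y1s x2s y2s : Int) :
    pvWindowCount (pts.map (fun p => p.1)) pts x1s y1s x2s y2s
      = (pts.countP (fun p => decide (p.1 > x1s ∧ p.1 < x2s ∧ p.2 > y1s ∧ p.2 < y2s)) : Int) := by
  set xs := pts.map (fun p : Int × Int => p.1) with hxs
  have hx : xs.Pairwise (· ≤ ·) := by rw [hxs, List.pairwise_map]; exact hs
  have hlen : xs.length = pts.length := by simp [hxs]
  have hxj : ∀ (j : Nat) (hj : j < pts.length), xs[j]'(by omega) = pts[j].1 := by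
    intro j hj; simp [hxs]
  obtain ⟨uL0, uL1, uL2, uL3⟩ :=
    pvUpper_spec xs hx x1s 0 xs.length (le_refl 0) (by positivity) (le_refl _)
  obtain ⟨lR0, lR1, lR2, lR3⟩ :=
    pvLower_spec xs hx x2s 0 xs.length (le_refl 0) (by positivity) (le_refl _)
  set L := pvUpper xs x1s 0 xs.length with hL
  set R := pvLower xs x2s 0 xs.length with hR
  unfold pvWindowCount
  rw [← hL, ← hR]
  by_cases hLR : R ≤ L
  · rw [PySem.List.pyRange_one_eq_nil hLR]
    simp only [List.foldl_nil]
    symm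
    have hzero : pts.countP (fun p => decide (p.1 > x1s ∧ p.1 < x2s ∧ p.2 > y1s ∧ p.2 < y2s)) = 0 := by
      rw [List.countP_eq_zero]
      intro p hp
      obtain ⟨j, hj, rfl⟩ := List.mem_iff_getElem.mp hp
      simp only [decide_eq_true_eq, not_and]
      intro hx1 hx2 _
      have h1 : ¬ ((j : Int) < L) := by
        intro hjl
        have := uL2 j (by omega) (by omega) hjl
        rw [hxj j hj] at this; omega
      have h2 : ¬ (R ≤ (j : Int)) := by
        intro hjr
        have := lR3 j (by omega) hjr (by omega)
        rw [hxj j hj] at this; omega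
      omega
    exact_mod_cast hzero
  · push Not at hLR
    rw [pvFoldlRange pts y1s y2s R (by omega) L (by omega) (by omega) 0]
    rw [zero_add]
    have hsplit1 : pts.take R.toNat = pts.take L.toNat ++ (pts.take R.toNat).drop L.toNat := by
      conv_lhs => rw [← List.take_append_drop L.toNat (pts.take R.toNat)]
      congr 1
      rw [List.take_take]
      congr 1
      omega
    have hsplit2 : pts = pts.take R.toNat ++ pts.drop R.toNat := (List.take_append_drop _ _).symm
    set mid := (pts.take R.toNat).drop L.toNat with hmid
    have hmidget : ∀ (k : Nat) (hk : k < mid.length),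
        mid[k] = pts[L.toNat + k]'(by simp [hmid] at hk; omega) := by
      intro k hk
      simp only [hmid, List.getElem_drop, List.getElem_take]
    conv_rhs => rw [hsplit2, hsplit1]
    rw [List.countP_append, List.countP_append]
    have hc1 : (pts.take L.toNat).countP (fun p => decide (p.1 > x1s ∧ p.1 < x2s ∧ p.2 > y1s ∧ p.2 < y2s)) = 0 := by
      rw [List.countP_eq_zero]
      intro p hp
      obtain ⟨k, hk, rfl⟩ := List.mem_iff_getElem.mp hp
      have hk' : k < L.toNat := by simp at hk; omega
      have hkp : k < pts.length := by omega
      rw [List.getElem_take]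
      simp only [decide_eq_true_eq, not_and]
      intro hx1
      have := uL2 k (by omega) (by omega) (by omega)
      rw [hxj k hkp] at this; omega
    have hc3 : (pts.drop R.toNat).countP (fun p => decide (p.1 > x1s ∧ p.1 < x2s ∧ p.2 > y1s ∧ p.2 < y2s)) = 0 := by
      rw [List.countP_eq_zero]
      intro p hp
      obtain ⟨k, hk, rfl⟩ := List.mem_iff_getElem.mp hp
      have hkp : R.toNat + k < pts.length := by simp at hk; omega
      rw [List.getElem_drop]
      simp only [decide_eq_true_eq, not_and]
      intro hx1 hx2
      have := lR3 (R.toNat + k) (by omega) (by omega) (by omega)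
      rw [hxj _ hkp] at this; omega
    have hc2 : mid.countP (fun p => decide (p.1 > x1s ∧ p.1 < x2s ∧ p.2 > y1s ∧ p.2 < y2s))
        = mid.countP (fun p => decide (y1s < p.2 ∧ p.2 < y2s)) := by
      apply List.countP_congr
      intro p hp
      obtain ⟨k, hk, rfl⟩ := List.mem_iff_getElem.mp hp
      rw [hmidget k hk]
      have hj : L.toNat + k < pts.length := by simp [hmid] at hk; omega
      have hkR : (L.toNat + k : Int) < R := by simp [hmid] at hk; omega
      have hx1 : x1s < pts[L.toNat + k].1 := by
        have := uL3 (L.toNat + k) (by omega) (by push_cast; omega) (by omega)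
        rw [hxj _ hj] at this; exact this
      have hx2 : pts[L.toNat + k].1 < x2s := by
        have := lR2 (L.toNat + k) (by omega) (by positivity) (by push_cast; omega)
        rw [hxj _ hj] at this; exact this
      simp [hx1, hx2]
    rw [hc1, hc2, hc3]
    simp

-- A's generator sum counts the objects satisfying the condition
lemma pvFoldlCount (x1s y1s x2s y2s : Int) (objs : List (Int × Int × Int × Int)) (a : Int) :
    objs.foldl (fun acc q => if q.1 > x1s ∧ q.1 < x2s ∧ q.2.2.2 > y1s ∧ q.2.2.2 < y2s then acc + 1 else acc) a
      = a + (objs.countP (fun q => decide (q.1 > x1s ∧ q.1 < x2s ∧ q.2.2.2 > y1s ∧ q.2.2.2 < y2s)) : Int) := by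
  induction objs generalizing a with
  | nil => simp
  | cons q t ih =>
      simp only [List.foldl_cons, List.countP_cons, ih]
      split <;> (simp_all; try ring)

-- B's prep + window count equals A's count over the raw object list
lemma pvWindow_eq_count (objs : List (Int × Int × Int × Int)) (x1s y1s x2s y2s : Int) :
    pvWindowCount (pvPrep objs).1 (pvPrep objs).2 x1s y1s x2s y2s
      = (objs.countP (fun q => decide (q.1 > x1s ∧ q.1 < x2s ∧ q.2.2.2 > y1s ∧ q.2.2.2 < y2s)) : Int) := by
  unfold pvPrep
  simp only []
  rw [pvWindowCount_eq _ (PySem.List.sorted_pairwise _ _)]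
  rw [(PySem.List.sorted_perm (objs.map (fun q => (q.1, q.2.2.2))) (fun p => p.1) false).countP_eq]
  rw [List.countP_map]
  rfl

-- ===== VERDICT =====
theorem count_objects_in_baskets_spec : Claim_equal_count_objects_in_baskets := by
  intro wb wm ks _
  show _ = _
  unfold count_objects_in_baskets count_objects_in_baskets_alt
  simp only []
  apply List.foldl_ext
  intro st p _
  rw [pvFoldlCount, pvFoldlCount, pvWindow_eq_count, pvWindow_eq_count]
  simp
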